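-- pv_equiv track=rewrite | github.com/Darukity/tdd-exam | holdem.py | _find_full_house_cards
-- ===== SOURCE A (Python) =====
-- from typing import Sequence
--
-- Card = str
--
-- RANK_TO_VALUE = {
--     "2": 2,
--     "3": 3,
--     "4": 4,
--     "5": 5,
--     "6": 6,
--     "7": 7,
--     "8": 8,
--     "9": 9,
--     "T": 10,
--     "J": 11,
--     "Q": 12,
--     "K": 13,
--     "A": 14,
-- }
--
-- def _card_rank_value(card: Card) -> int:
--     return RANK_TO_VALUE[card[0]]
--
-- def _as_chosen5(cards: Sequence[Card]) -> tuple[Card, Card, Card, Card, Card]: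
--     return (cards[0], cards[1], cards[2], cards[3], cards[4])
--
-- def _group_cards_by_rank(cards: Sequence[Card]) -> dict[int, list[Card]]:
--     cards_by_rank: dict[int, list[Card]] = {}
--     for card in cards:
--         rank = _card_rank_value(card)
--         cards_by_rank.setdefault(rank, []).append(card)
--     return cards_by_rank
--
-- def _find_full_house_cards(cards: Sequence[Card]) -> tuple[Card, Card, Card, Card, Card] | None:
--     cards_by_rank = _group_cards_by_rank(cards)
--
--     trip_ranks = sorted([rank for rank, rank_cards in cards_by_rank.items() if len(rank_cards) >= 3], reverse=True)
--     if not trip_ranks: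
--         return None
--
--     for trip_rank in trip_ranks:
--         pair_ranks = sorted(
--             [rank for rank, rank_cards in cards_by_rank.items() if rank != trip_rank and len(rank_cards) >= 2],
--             reverse=True,
--         )
--
--         if pair_ranks:
--             pair_rank = pair_ranks[0]
--             trip_cards = cards_by_rank[trip_rank][:3]
--             pair_cards = cards_by_rank[pair_rank][:2]
--             return _as_chosen5([trip_cards[0], trip_cards[1], trip_cards[2], pair_cards[0], pair_cards[1]])
--
--     return None
-- ===== SOURCE B (Python) =====
-- from typing import Sequence
--
-- Card = str
--
-- RANK_TO_VALUE = {
--     "2": 2, "3": 3, "4": 4, "5": 5, "6": 6, "7": 7, "8": 8,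
--     "9": 9, "T": 10, "J": 11, "Q": 12, "K": 13, "A": 14,
-- }
--
-- def _find_full_house_cards(cards: Sequence[Card]) -> tuple[Card, Card, Card, Card, Card] | None:
--     groups: dict[int, list[Card]] = {}
--     for card in cards:
--         groups.setdefault(RANK_TO_VALUE[card[0]], []).append(card)
--
--     trips = [r for r, cs in groups.items() if len(cs) >= 3]
--     if not trips:
--         return None
--     trip_rank = max(trips)
--
--     pairs = [r for r, cs in groups.items() if r != trip_rank and len(cs) >= 2]
--     if not pairs:
--         return None
--     pair_rank = max(pairs)
--
--     t3 = groups[trip_rank][:3]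
--     p2 = groups[pair_rank][:2]
--     return (t3[0], t3[1], t3[2], p2[0], p2[1])
-- ===== Notes on version B (the rewrite author's own statement) =====
-- stated objective: simpler
-- what changed: Replaces A's outer for-loop over a reverse-sorted trip-rank list (with a full reverse-sort of the pair candidates rebuilt inside every iteration) by a direct computation: max() over the trip ranks, then max() over the pair candidates for that single trip rank, with no sorting and no loop.
import Mathlib
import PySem

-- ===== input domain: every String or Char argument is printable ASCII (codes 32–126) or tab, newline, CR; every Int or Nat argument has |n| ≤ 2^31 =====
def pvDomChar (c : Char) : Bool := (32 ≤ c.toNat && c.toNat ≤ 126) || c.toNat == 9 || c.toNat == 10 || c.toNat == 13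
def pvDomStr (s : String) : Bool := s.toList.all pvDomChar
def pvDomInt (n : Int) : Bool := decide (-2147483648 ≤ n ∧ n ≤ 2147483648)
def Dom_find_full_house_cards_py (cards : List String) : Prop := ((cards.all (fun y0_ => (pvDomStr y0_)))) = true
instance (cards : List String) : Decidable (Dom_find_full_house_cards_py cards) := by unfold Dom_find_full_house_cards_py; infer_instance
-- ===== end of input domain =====

-- B replaces A's outer loop over a reverse-sorted trip-rank list (which re-sorts the pair candidates
-- in every iteration) by two direct max() computations; objective: simpler. Equivalence proved on
-- Pre_ (cards whose first character is a valid rank — elsewhere Python A raises).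

-- ===== PORT A =====
-- module constant RANK_TO_VALUE (shared context of both Pythons)
def rankToValue : PySem.Dict Char Int :=
  PySem.Dict.ofList [('2', 2), ('3', 3), ('4', 4), ('5', 5), ('6', 6), ('7', 7), ('8', 8),
                     ('9', 9), ('T', 10), ('J', 11), ('Q', 12), ('K', 13), ('A', 14)]

-- _card_rank_value: RANK_TO_VALUE[card[0]]; exact on Pre_ (card nonempty, first char a rank key)
def card_rank_value (card : String) : Int :=
  (rankToValue.get? (card.toList.headD ' ')).getD 0

-- _as_chosen5: (cards[0], …, cards[4]); exact at its call sites (the list built there has 5 elements)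
def as_chosen5 (cs : List String) : String × String × String × String × String :=
  (PySem.List.pyGetD cs 0 "", PySem.List.pyGetD cs 1 "", PySem.List.pyGetD cs 2 "",
   PySem.List.pyGetD cs 3 "", PySem.List.pyGetD cs 4 "")

-- _group_cards_by_rank: setdefault(rank, []).append(card) = modify rank [] (· ++ [card])
def group_cards_by_rank (cards : List String) : PySem.Dict Int (List String) :=
  cards.foldl (fun d card => d.modify (card_rank_value card) [] (· ++ [card])) PySem.Dict.empty

-- the 'for trip_rank in trip_ranks' loop of A
def fh_loop (d : PySem.Dict Int (List String)) :
    List Int → Option (String × String × String × String × String)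
  | [] => none
  | trip_rank :: rest =>
    let pair_ranks := PySem.List.sorted
      ((d.items.filter (fun p => decide (p.1 ≠ trip_rank) && decide (2 ≤ p.2.length))).map (·.1))
      (fun x => x) true
    match pair_ranks with
    | [] => fh_loop d rest
    | pair_rank :: _ =>
      let trip_cards := PySem.List.slice (d.getD trip_rank []) none (some 3)
      let pair_cards := PySem.List.slice (d.getD pair_rank []) none (some 2)
      some (as_chosen5 [PySem.List.pyGetD trip_cards 0 "", PySem.List.pyGetD trip_cards 1 "",
                        PySem.List.pyGetD trip_cards 2 "", PySem.List.pyGetD pair_cards 0 "",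
                        PySem.List.pyGetD pair_cards 1 ""])

def find_full_house_cards_py (cards : List String) :
    Option (String × String × String × String × String) :=
  let cards_by_rank := group_cards_by_rank cards
  let trip_ranks := PySem.List.sorted
    ((cards_by_rank.items.filter (fun p => decide (3 ≤ p.2.length))).map (·.1)) (fun x => x) true
  if trip_ranks = [] then none
  else fh_loop cards_by_rank trip_ranks

-- ===== PORT B =====
def find_full_house_cards_py_alt (cards : List String) :
    Option (String × String × String × String × String) :=
  let groups := cards.foldl
    (fun d card => d.modify ((rankToValue.get? (card.toList.headD ' ')).getD 0) [] (· ++ [card]))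
    PySem.Dict.empty
  let trips := (groups.items.filter (fun p => decide (3 ≤ p.2.length))).map (·.1)
  match PySem.List.max? trips (fun x => x) with
  | none => none
  | some trip_rank =>
    let pairs := (groups.items.filter
      (fun p => decide (p.1 ≠ trip_rank) && decide (2 ≤ p.2.length))).map (·.1)
    match PySem.List.max? pairs (fun x => x) with
    | none => none
    | some pair_rank =>
      let t3 := PySem.List.slice (groups.getD trip_rank []) none (some 3)
      let p2 := PySem.List.slice (groups.getD pair_rank []) none (some 2)
      some (PySem.List.pyGetD t3 0 "", PySem.List.pyGetD t3 1 "", PySem.List.pyGetD t3 2 "",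
            PySem.List.pyGetD p2 0 "", PySem.List.pyGetD p2 1 "")

-- ===== PRECONDITION & SPEC =====
-- Pre_: every card is nonempty and opens with a rank character — exactly where Python A
-- does not raise (empty card → IndexError, unknown first character → KeyError).
def Pre_find_full_house_cards_py (cards : List String) : Prop :=
  (cards.all (fun c =>
    match c.toList with
    | [] => false
    | ch :: _ => ['2','3','4','5','6','7','8','9','T','J','Q','K','A'].contains ch)) = true
instance (cards : List String) : Decidable (Pre_find_full_house_cards_py cards) := by
  unfold Pre_find_full_house_cards_py; infer_instance

def pvWitness_find_full_house_cards_py : List String := ["2s", "2h", "2d", "3s", "3h"]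

def Spec_find_full_house_cards_py (cards : List String)
    (out : Option (String × String × String × String × String)) : Prop :=
  out = find_full_house_cards_py_alt cards
instance (cards : List String) (out : Option (String × String × String × String × String)) :
    Decidable (Spec_find_full_house_cards_py cards out) := by
  unfold Spec_find_full_house_cards_py; infer_instance

-- ===== CLAIM (what is proved, stated in full; the proofs are below) =====
def Claim_equal_find_full_house_cards_py : Prop :=
  ∀ (cards : List String), Dom_find_full_house_cards_py cards →
    Pre_find_full_house_cards_py cards →
    Spec_find_full_house_cards_py cards (find_full_house_cards_py cards)

-- ===== LEMMAS AND PROOFS =====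

-- the head of a reverse-sorted Int list is Python's max() of the list
lemma head_sorted_rev_eq_max (l rest : List Int) (t : Int)
    (h : PySem.List.sorted l (fun x => x) true = t :: rest) :
    PySem.List.max? l (fun x => x) = some t := by
  have hperm : (t :: rest).Perm l := by
    have := PySem.List.sorted_perm l (fun x => x) true
    rwa [h] at this
  have ht : t ∈ l := hperm.mem_iff.mp (List.mem_cons_self)
  cases hm : PySem.List.max? l (fun x => x) with
  | none =>
    rw [PySem.List.max?_eq_none_iff] at hm
    simp [hm] at ht
  | some m =>
    have hm_mem : m ∈ l := PySem.List.max?_mem hm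
    have h1 : t ≤ m := PySem.List.max?_isMax hm t ht
    have h2 : m ≤ t := PySem.List.key_head_sorted_rev_ge l (fun x => x) h m hm_mem
    rw [le_antisymm h2 h1]

lemma nodup_keys_group (cards : List String) : (group_cards_by_rank cards).keys.Nodup := by
  unfold group_cards_by_rank
  exact PySem.Dict.nodup_keys_foldl_modify_key cards card_rank_value []
    (fun _ card => (· ++ [card])) PySem.Dict.empty (by simp [pysem])

-- membership in (items.filter f).map fst transfers along weakening of the filter
lemma mem_filtered_keys (d : PySem.Dict Int (List String)) (t r : Int)
    (hr : r ∈ (d.items.filter (fun p => decide (3 ≤ p.2.length))).map (·.1))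
    (hne : r ≠ t) :
    r ∈ (d.items.filter (fun p => decide (p.1 ≠ t) && decide (2 ≤ p.2.length))).map (·.1) := by
  simp only [List.mem_map, List.mem_filter, Bool.and_eq_true, decide_eq_true_eq] at hr ⊢
  obtain ⟨p, ⟨hp, h3⟩, hfst⟩ := hr
  exact ⟨p, ⟨hp, by omega⟩, hfst⟩

theorem find_full_house_cards_py_spec : Claim_equal_find_full_house_cards_py := by
  intro cards _ _
  unfold Spec_find_full_house_cards_py find_full_house_cards_py find_full_house_cards_py_alt
  have hge : (cards.foldl
      (fun d card => d.modify ((rankToValue.get? (card.toList.headD ' ')).getD 0) [] (· ++ [card]))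
      PySem.Dict.empty) = group_cards_by_rank cards := rfl
  rw [hge]
  simp only []
  set d := group_cards_by_rank cards with hd
  have hnd : (d.items.map (·.1)).Nodup := nodup_keys_group cards
  set trips := (d.items.filter (fun p => decide (3 ≤ p.2.length))).map (·.1) with htr
  have htrnd : trips.Nodup :=
    List.Nodup.sublist (List.Sublist.map _ List.filter_sublist) hnd
  cases hts : PySem.List.sorted trips (fun x => x) true with
  | nil =>
    have htrips : trips = [] := by
      have := PySem.List.sorted_eq_nil_iff (xs := trips) (key := fun x => x) (rev := true)
      exact this.mp hts
    rw [if_pos rfl]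
    have hmn : PySem.List.max? trips (fun x => x) = none := by
      rw [PySem.List.max?_eq_none_iff]; exact htrips
    rw [hmn]
  | cons t rest =>
    rw [head_sorted_rev_eq_max trips rest t hts]
    rw [if_neg (by simp)]
    simp only [fh_loop]
    set pl := (d.items.filter (fun p => decide (p.1 ≠ t) && decide (2 ≤ p.2.length))).map (·.1)
      with hpl
    cases hps : PySem.List.sorted pl (fun x => x) true with
    | nil =>
      have hple : pl = [] := by
        have := PySem.List.sorted_eq_nil_iff (xs := pl) (key := fun x => x) (rev := true)
        exact this.mp hps
      have hmaxn : PySem.List.max? pl (fun x => x) = none := by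
        rw [PySem.List.max?_eq_none_iff]; exact hple
      rw [hmaxn]
      have hperm : (t :: rest).Perm trips := by
        have := PySem.List.sorted_perm trips (fun x => x) true
        rwa [hts] at this
      have hndtr : (t :: rest).Nodup := (hperm.symm).nodup htrnd
      cases rest with
      | nil => simp [fh_loop]
      | cons r rest' =>
        exfalso
        have hrmem : r ∈ trips := hperm.mem_iff.mp (by simp)
        have hrne : r ≠ t := by
          intro h
          have : t ∈ r :: rest' := by simp [h]
          exact (List.nodup_cons.mp hndtr).1 this
        have := mem_filtered_keys d t r hrmem hrne
        rw [← hpl, hple] at this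
        simp at this
    | cons q qrest =>
      rw [head_sorted_rev_eq_max pl qrest q hps]
      simp only []
      rfl
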